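-- pv_equiv track=rewrite | github.com/bghandley/xptracker2 | goals_recommendation.py | generate_goal_recommendations
-- ===== SOURCE A (Python) =====
-- from typing import Dict, List, Any, Optional, Tuple
--
-- def generate_goal_recommendations(profile: Dict[str, Any]) -> List[Dict[str, Any]]:
--     """Deterministic fallback for goal recommendations."""
--     life_goals = profile.get("life_goals", [])
--     recs = []
--
--     for category in life_goals:
--         cat_lower = category.lower()
--         if "health" in cat_lower or "fitness" in cat_lower:
--             recs.append({
--                 "name": "Complete a 30-Day Fitness Challenge",
--                 "category": category,
--                 "reason": "A time-bound challenge is a great way to jumpstart your fitness journey."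
--             })
--         elif "career" in cat_lower or "learning" in cat_lower:
--             recs.append({
--                 "name": "Master a New Skill (e.g. Python, Public Speaking)",
--                 "category": category,
--                 "reason": "Focusing on a single skill helps you make tangible career progress."
--             })
--         elif "mental" in cat_lower:
--             recs.append({
--                 "name": "Establish a Daily Mindfulness Routine",
--                 "category": category,
--                 "reason": "Consistent mindfulness reduces stress and improves focus."
--             })
--         elif "finance" in cat_lower or "money" in cat_lower:
--             recs.append({
--                 "name": "Save $1,000 Emergency Fund",
--                 "category": category,
--                 "reason": "Financial security starts with a safety net."
--             })
--         else:
--              recs.append({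
--                 "name": f"Improve {category}",
--                 "category": category,
--                 "reason": f" dedicating time to {category} will improve your life balance."
--             })
--
--     # Deduplicate and limit
--     unique_recs = []
--     seen = set()
--     for r in recs:
--         if r["name"] not in seen:
--             unique_recs.append(r)
--             seen.add(r["name"])
--
--     return unique_recs[:4]
-- ===== SOURCE B (Python) =====
-- _FLAT_RULES = [
--     ("health", "Complete a 30-Day Fitness Challenge",
--      "A time-bound challenge is a great way to jumpstart your fitness journey."),
--     ("fitness", "Complete a 30-Day Fitness Challenge",
--      "A time-bound challenge is a great way to jumpstart your fitness journey."),
--     ("career", "Master a New Skill (e.g. Python, Public Speaking)",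
--      "Focusing on a single skill helps you make tangible career progress."),
--     ("learning", "Master a New Skill (e.g. Python, Public Speaking)",
--      "Focusing on a single skill helps you make tangible career progress."),
--     ("mental", "Establish a Daily Mindfulness Routine",
--      "Consistent mindfulness reduces stress and improves focus."),
--     ("finance", "Save $1,000 Emergency Fund",
--      "Financial security starts with a safety net."),
--     ("money", "Save $1,000 Emergency Fund",
--      "Financial security starts with a safety net."),
-- ]
--
--
-- def _classify(category):
--     """(name, category, reason) triple for one category: first flat keyword hit."""
--     cat_lower = category.lower()
--     for kw, name, reason in _FLAT_RULES:
--         if kw in cat_lower: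
--             return (name, category, reason)
--     return (f"Improve {category}", category,
--             f" dedicating time to {category} will improve your life balance.")
--
--
-- def _dedup_by_name(triples):
--     """Keep first occurrence per name by repeatedly filtering the tail."""
--     out = []
--     while triples:
--         head = triples[0]
--         out.append(head)
--         triples = [t for t in triples[1:] if t[0] != head[0]]
--     return out
--
--
-- def generate_goal_recommendations(profile):
--     """Deterministic fallback: classify to lightweight tuples, dedup the tuples
--     by filtering, and only then materialize the recommendation dicts."""
--     triples = [_classify(c) for c in profile.get("life_goals", [])]
--     return [{"name": n, "category": c, "reason": r}
--             for (n, c, r) in _dedup_by_name(triples)[:4]]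
-- ===== Notes on version B (the rewrite author's own statement) =====
-- stated objective: alternative
-- what changed: B restages the pipeline: it classifies each category to a lightweight (name, category, reason) TUPLE via one flat prioritized keyword scan, deduplicates the tuples with a repeated-filtering algorithm (take head, filter its name out of the tail) instead of A's seen-set accumulator over dicts, and only materializes the recommendation dicts at the end from the first 4 surviving tuples.
import Mathlib
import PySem

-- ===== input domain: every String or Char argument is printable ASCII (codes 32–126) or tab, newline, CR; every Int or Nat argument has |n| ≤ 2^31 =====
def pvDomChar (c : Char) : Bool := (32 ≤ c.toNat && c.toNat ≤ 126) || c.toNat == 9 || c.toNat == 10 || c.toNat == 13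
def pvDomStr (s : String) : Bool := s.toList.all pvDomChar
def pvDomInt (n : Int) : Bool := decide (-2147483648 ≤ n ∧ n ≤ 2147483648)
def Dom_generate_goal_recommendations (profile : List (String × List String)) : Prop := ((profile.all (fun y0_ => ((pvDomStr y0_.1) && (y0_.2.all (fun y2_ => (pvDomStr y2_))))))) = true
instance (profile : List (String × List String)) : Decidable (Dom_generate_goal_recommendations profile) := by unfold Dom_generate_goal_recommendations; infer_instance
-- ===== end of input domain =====

-- B restages the pipeline: flat prioritized keyword scan to (name, category, reason) tuples,
-- filter-based dedup on the tuples, dicts materialized only at the end (alternative decomposition).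


-- ===== PORT A =====
-- A's loop body (the if/elif chain building one recommendation dict), extracted as a helper.
def pvRecA (category : String) : List (String × String) :=
  let cat_lower := PySem.Str.lower category
  if PySem.Str.isIn "health" cat_lower || PySem.Str.isIn "fitness" cat_lower then
    [("name", "Complete a 30-Day Fitness Challenge"), ("category", category),
     ("reason", "A time-bound challenge is a great way to jumpstart your fitness journey.")]
  else if PySem.Str.isIn "career" cat_lower || PySem.Str.isIn "learning" cat_lower then
    [("name", "Master a New Skill (e.g. Python, Public Speaking)"), ("category", category),
     ("reason", "Focusing on a single skill helps you make tangible career progress.")]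
  else if PySem.Str.isIn "mental" cat_lower then
    [("name", "Establish a Daily Mindfulness Routine"), ("category", category),
     ("reason", "Consistent mindfulness reduces stress and improves focus.")]
  else if PySem.Str.isIn "finance" cat_lower || PySem.Str.isIn "money" cat_lower then
    [("name", "Save $1,000 Emergency Fund"), ("category", category),
     ("reason", "Financial security starts with a safety net.")]
  else
    [("name", "Improve " ++ category), ("category", category),
     ("reason", " dedicating time to " ++ category ++ " will improve your life balance.")]

-- A's dedup-loop body: if r["name"] not in seen, append r and add the name.
def pvDedupStep (st : List (List (String × String)) × PySem.Set String)
    (r : List (String × String)) : List (List (String × String)) × PySem.Set String :=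
  if PySem.Set.contains st.2 ((PySem.Dict.mk r).getD "name" "") = false then
    (st.1 ++ [r], PySem.Set.add st.2 ((PySem.Dict.mk r).getD "name" ""))
  else st

def generate_goal_recommendations (profile : List (String × List String)) : List (List (String × String)) :=
  let life_goals := (PySem.Dict.mk profile).getD "life_goals" []
  let recs := life_goals.foldl (fun recs category => recs ++ [pvRecA category]) []
  let st := recs.foldl pvDedupStep ([], PySem.Set.empty)
  PySem.List.slice st.1 none (some 4)

-- ===== PORT B =====
-- _FLAT_RULES: priority-ordered (keyword, name, reason) triples
def pvFlatRules : List (String × String × String) :=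
  [ ("health", "Complete a 30-Day Fitness Challenge",
     "A time-bound challenge is a great way to jumpstart your fitness journey."),
    ("fitness", "Complete a 30-Day Fitness Challenge",
     "A time-bound challenge is a great way to jumpstart your fitness journey."),
    ("career", "Master a New Skill (e.g. Python, Public Speaking)",
     "Focusing on a single skill helps you make tangible career progress."),
    ("learning", "Master a New Skill (e.g. Python, Public Speaking)",
     "Focusing on a single skill helps you make tangible career progress."),
    ("mental", "Establish a Daily Mindfulness Routine",
     "Consistent mindfulness reduces stress and improves focus."),
    ("finance", "Save $1,000 Emergency Fund",
     "Financial security starts with a safety net."),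
    ("money", "Save $1,000 Emergency Fund",
     "Financial security starts with a safety net.") ]

-- _classify: (name, category, reason) triple from the first matching flat rule.
def pvClassify (category : String) : String × String × String :=
  let cat_lower := PySem.Str.lower category
  match pvFlatRules.find? (fun rule => PySem.Str.isIn rule.1 cat_lower) with
  | some (_, name, reason) => (name, category, reason)
  | none => ("Improve " ++ category, category,
             " dedicating time to " ++ category ++ " will improve your life balance.")

-- _dedup_by_name: take the head, filter its name out of the tail, repeat.
def pvDedupByName : List (String × String × String) → List (String × String × String)
  | [] => []
  | h :: t => h :: pvDedupByName (t.filter (fun x => x.1 != h.1))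
termination_by l => l.length
decreasing_by
  have := List.length_filter_le (fun (x : {x // x ∈ t}) => x.1.1 != h.1) t.attach
  simp at this
  simpa using Nat.lt_succ_of_le this

def pvToDict (t : String × String × String) : List (String × String) :=
  [("name", t.1), ("category", t.2.1), ("reason", t.2.2)]

def generate_goal_recommendations_alt (profile : List (String × List String)) : List (List (String × String)) :=
  let triples := ((PySem.Dict.mk profile).getD "life_goals" []).map pvClassify
  ((pvDedupByName triples).take 4).map pvToDict

-- ===== PRECONDITION & SPEC =====
def Spec_generate_goal_recommendations (profile : List (String × List String)) (out : List (List (String × String))) : Prop := out = generate_goal_recommendations_alt profile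
instance (profile : List (String × List String)) (out : List (List (String × String))) : Decidable (Spec_generate_goal_recommendations profile out) := by unfold Spec_generate_goal_recommendations; infer_instance

-- ===== CLAIM =====
def Claim_equal_generate_goal_recommendations : Prop := ∀ (profile : List (String × List String)), Dom_generate_goal_recommendations profile → Spec_generate_goal_recommendations profile (generate_goal_recommendations profile)

-- ===== LEMMAS AND PROOFS =====

-- A's if/elif chain builds exactly the dict of B's flat-scan triple.
theorem pvRec_eq (category : String) : pvRecA category = pvToDict (pvClassify category) := by
  simp only [pvRecA, pvClassify, pvFlatRules, pvToDict, List.find?_cons]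
  cases h1 : PySem.Str.isIn "health" (PySem.Str.lower category) <;>
  cases h2 : PySem.Str.isIn "fitness" (PySem.Str.lower category) <;>
  cases h3 : PySem.Str.isIn "career" (PySem.Str.lower category) <;>
  cases h4 : PySem.Str.isIn "learning" (PySem.Str.lower category) <;>
  cases h5 : PySem.Str.isIn "mental" (PySem.Str.lower category) <;>
  cases h6 : PySem.Str.isIn "finance" (PySem.Str.lower category) <;>
  cases h7 : PySem.Str.isIn "money" (PySem.Str.lower category) <;>
  simp

-- A's first loop is a map.
theorem pvFoldl_map {α β : Type} (f : α → β) (l : List α) (acc : List β) :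
    l.foldl (fun recs c => recs ++ [f c]) acc = acc ++ l.map f := by
  induction l generalizing acc with
  | nil => simp
  | cons c l ih => simp [List.foldl_cons, ih, List.append_assoc]

-- The "name" field of a materialized triple is its first component.
theorem pvName_toDict (t : String × String × String) :
    (PySem.Dict.mk (pvToDict t)).getD "name" "" = t.1 := by
  simp [pvToDict, PySem.Dict.getD, PySem.Dict.get?_mk_cons]

-- membership after Set.add, in Bool form.
theorem pvContains_add (s : PySem.Set String) (a x : String) :
    List.contains (PySem.Set.add s a) x = (List.contains s x || x == a) := by
  have hd : decide (x = a) = (x == a) := by cases hx : x == a <;> simp_all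
  simp only [PySem.Set.add]
  split_ifs with h
  · cases hx : x == a
    · simp
    · have hxa : x = a := by simpa using hx
      subst hxa
      simp only [PySem.Set.contains_eq_listContains] at h
      simp at h
      simp [h]
  · simp [hd]

-- A's seen-set dedup fold over the materialized dicts equals B's filter-based
-- dedup of the not-yet-seen triples, materialized afterwards.
theorem pvDedup_eq (l : List (String × String × String)) (out : List (List (String × String)))
    (seen : PySem.Set String) :
    ((l.map pvToDict).foldl pvDedupStep (out, seen)).1
      = out ++ (pvDedupByName (l.filter (fun t => !(PySem.Set.contains seen t.1)))).map pvToDict := by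
  induction hn : l.length using Nat.strong_induction_on generalizing l out seen with
  | _ n ih =>
    cases l with
    | nil => simp [pvDedupByName]
    | cons t l =>
      simp only [List.map_cons, List.foldl_cons, pvDedupStep, pvName_toDict, List.filter_cons]
      cases hs : PySem.Set.contains seen t.1 with
      | true =>
        rw [if_neg (by simp : ¬(true = false)), if_neg (by simp : ¬((!true) = true))]
        exact ih l.length (by simp [← hn]) l out seen rfl
      | false =>
        rw [if_pos rfl, if_pos (by simp : (!false) = true)]
        rw [ih l.length (by simp [← hn]) l (out ++ [pvToDict t]) (PySem.Set.add seen t.1) rfl]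
        have hfilt : ∀ x : String × String × String,
            (!(PySem.Set.contains (PySem.Set.add seen t.1) x.1))
              = ((x.1 != t.1) && !(PySem.Set.contains seen x.1)) := by
          intro x
          simp only [PySem.Set.contains_eq_listContains, pvContains_add]
          cases hx : x.1 == t.1 <;> cases hc : List.contains seen x.1 <;> simp_all
        have hff : l.filter (fun x => !(PySem.Set.contains (PySem.Set.add seen t.1) x.1))
            = (l.filter (fun x => !(PySem.Set.contains seen x.1))).filter (fun x => x.1 != t.1) := by
          rw [List.filter_filter]
          exact List.filter_congr (fun x _ => hfilt x)
        rw [hff, pvDedupByName]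
        simp [List.append_assoc]

-- ===== VERDICT =====
theorem generate_goal_recommendations_spec : Claim_equal_generate_goal_recommendations := by
  intro profile _
  simp only [Spec_generate_goal_recommendations, generate_goal_recommendations,
    generate_goal_recommendations_alt]
  rw [pvFoldl_map, List.nil_append,
    List.map_congr_left (fun c (_ : c ∈ (PySem.Dict.mk profile).getD "life_goals" []) => pvRec_eq c),
    show (fun c => pvToDict (pvClassify c)) = pvToDict ∘ pvClassify from rfl,
    ← List.map_map, pvDedup_eq, List.nil_append,
    PySem.List.slice_to _ (by norm_num : (0:Int) ≤ 4), List.map_take]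
  rw [show (fun t : String × String × String => !(PySem.Set.contains PySem.Set.empty t.1))
        = fun _ => true from funext (fun x => by simp [PySem.Set.empty]),
    List.filter_true, show Int.toNat 4 = 4 from rfl]
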